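-- pv_equiv track=rewrite | github.com/Hizaak/S2-02-Exploration_algorithmique_d_un_probleme | Programmes/Visualisation/methodes.py | min_exclude
-- ===== SOURCE A (Python) =====
-- def min_exclude(distance,marque):
--     """Retourne l'indice du tableau de la valeur minimale en ignorant les valeurs des indices inscrit dans la liste marque"""
--     min=-1                              #valeur par default marqueur d'erreur si aucun arret est trouvé
--     for i in range (len(distance)):     #On parcours tout les arrets
--         if i not in marque:                     #S'il n'est pas déjà marqué
--             if min==-1:
--                 min=i                               #La première valeur devient le minimum
--             elif distance[i][0]<distance[min][0]:   #Si l'arret i à une distance inferieur a l'arret min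
--                 min=i                               #L'arret i devient le nouveau min
--     return min          #Retourne l'arret avec la distance minimale
-- ===== SOURCE B (Python) =====
-- def min_exclude(distance, marque):
--     """Retourne l'indice du tableau de la valeur minimale en ignorant les valeurs des indices inscrit dans la liste marque"""
--     candidates = [i for i in range(len(distance)) if i not in marque]
--     if not candidates:
--         return -1
--
--     def best(lo, hi):
--         # tournament over candidates[lo:hi]; leaves are single candidates,
--         # a match keeps the strictly closer one, the earlier one on a tie
--         if hi - lo <= 1:
--             return candidates[lo]
--         mid = (lo + hi) // 2
--         l = best(lo, mid)
--         r = best(mid, hi)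
--         return r if distance[r][0] < distance[l][0] else l
--
--     return best(0, len(candidates))
-- ===== Notes on version B (the rewrite author's own statement) =====
-- stated objective: alternative
-- what changed: Replaces the sentinel running-minimum scan by a filter pass building the unmarked candidate indices followed by a recursive divide-and-conquer tournament (prefer-left on ties) that picks the first candidate with minimal distance[i][0].
import Mathlib
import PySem

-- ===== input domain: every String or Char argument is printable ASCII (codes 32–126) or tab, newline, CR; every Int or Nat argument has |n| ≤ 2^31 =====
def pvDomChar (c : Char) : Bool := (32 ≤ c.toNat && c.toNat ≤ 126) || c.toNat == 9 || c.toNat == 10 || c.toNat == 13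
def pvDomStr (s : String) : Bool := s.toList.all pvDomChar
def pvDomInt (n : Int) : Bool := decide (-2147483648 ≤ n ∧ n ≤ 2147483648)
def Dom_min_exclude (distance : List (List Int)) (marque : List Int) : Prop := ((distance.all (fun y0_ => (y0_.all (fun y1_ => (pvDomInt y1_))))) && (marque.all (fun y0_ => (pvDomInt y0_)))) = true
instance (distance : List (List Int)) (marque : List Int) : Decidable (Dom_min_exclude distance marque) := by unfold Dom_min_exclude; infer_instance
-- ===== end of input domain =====

-- B replaces A's sentinel running-minimum scan by a filter pass plus a divide-and-conquer
-- tournament (prefer-left on ties); same return value, no side effects in either.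

-- distance[i][0], total stand-in: defaults never matter on inputs where the Pythons return
def pvD0 (distance : List (List Int)) (i : Int) : Int :=
  ((PySem.List.pyGet? ((PySem.List.pyGet? distance i).getD []) 0).getD 0)

-- ===== PORT A =====
def min_exclude (distance : List (List Int)) (marque : List Int) : Int :=
  (PySem.List.pyRange 0 (distance.length : Int) 1).foldl
    (fun min i =>
      if !(marque.contains i) then
        if min == -1 then i
        else if pvD0 distance i < pvD0 distance min then i
        else min
      else min)
    (-1)

-- ===== PORT B =====
-- 'return r if distance[r][0] < distance[l][0] else l' of Source B's best
def pvMatch (distance : List (List Int)) (l r : Int) : Int :=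
  if pvD0 distance r < pvD0 distance l then r else l

-- Source B's inner 'best(lo, hi)'; candidates[lo] is total via getD (in range whenever called)
def pvBest (distance : List (List Int)) (cand : List Int) (lo hi : Nat) : Int :=
  if hi ≤ lo + 1 then cand.getD lo 0
  else
    let mid := (lo + hi) / 2
    pvMatch distance (pvBest distance cand lo mid) (pvBest distance cand mid hi)
termination_by hi - lo
decreasing_by all_goals omega

def min_exclude_alt (distance : List (List Int)) (marque : List Int) : Int :=
  let candidates := (PySem.List.pyRange 0 (distance.length : Int) 1).filter
      (fun i => !(marque.contains i))
  if candidates = [] then -1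
  else pvBest distance candidates 0 candidates.length

-- ===== PRECONDITION & SPEC =====
-- Pre_ excludes exactly the inputs where BOTH Pythons raise IndexError: two or more unmarked
-- indices exist and some unmarked index holds an empty row (A compares distance[i][0] there,
-- B plays a match on it); with at most one unmarked index neither program ever indexes a row.
def Pre_min_exclude (distance : List (List Int)) (marque : List Int) : Prop :=
  (∃ i j : Fin distance.length, i ≠ j ∧ ¬ ((i.1 : Int) ∈ marque) ∧ ¬ ((j.1 : Int) ∈ marque)) →
    ∀ i : Fin distance.length, ¬ ((i.1 : Int) ∈ marque) → distance.get i ≠ []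
instance (distance : List (List Int)) (marque : List Int) : Decidable (Pre_min_exclude distance marque) := by unfold Pre_min_exclude; infer_instance
def pvWitness_min_exclude : List (List Int) × List Int := ([[3], [1], [2]], [1])

def Spec_min_exclude (distance : List (List Int)) (marque : List Int) (out : Int) : Prop := out = min_exclude_alt distance marque
instance (distance : List (List Int)) (marque : List Int) (out : Int) : Decidable (Spec_min_exclude distance marque out) := by unfold Spec_min_exclude; infer_instance

-- ===== CLAIM (what is proved, stated in full; the proofs are below) =====
def Claim_equal_min_exclude : Prop := ∀ (distance : List (List Int)) (marque : List Int), Dom_min_exclude distance marque → Pre_min_exclude distance marque → Spec_min_exclude distance marque (min_exclude distance marque)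

-- ===== LEMMAS AND PROOFS =====

-- the tournament's specification: first minimal element of a nonempty list of candidates
def pvFold (distance : List (List Int)) : List Int → Int
  | [] => 0
  | x :: xs => xs.foldl (pvMatch distance) x

theorem pvMatch_assoc (d : List (List Int)) (a b c : Int) :
    pvMatch d (pvMatch d a b) c = pvMatch d a (pvMatch d b c) := by
  unfold pvMatch
  split_ifs <;> omega

theorem foldl_pull (d : List (List Int)) :
    ∀ (l : List Int) (a b : Int),
      l.foldl (pvMatch d) (pvMatch d a b) = pvMatch d a (l.foldl (pvMatch d) b) := by
  intro l
  induction l with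
  | nil => intro a b; simp
  | cons c t ih =>
    intro a b
    simp only [List.foldl_cons, pvMatch_assoc, ih]

theorem pvFold_append (d : List (List Int)) (l1 l2 : List Int)
    (h1 : l1 ≠ []) (h2 : l2 ≠ []) :
    pvFold d (l1 ++ l2) = pvMatch d (pvFold d l1) (pvFold d l2) := by
  cases l1 with
  | nil => exact absurd rfl h1
  | cons x xs =>
    cases l2 with
    | nil => exact absurd rfl h2
    | cons y ys =>
      simp only [pvFold, List.cons_append, List.foldl_cons, List.foldl_append]
      exact foldl_pull d ys _ y

theorem pvBest_eq_fold (d : List (List Int)) (cand : List Int) :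
    ∀ (n lo hi : Nat), hi - lo = n → lo < hi → hi ≤ cand.length →
      pvBest d cand lo hi = pvFold d ((cand.drop lo).take (hi - lo)) := by
  intro n
  induction n using Nat.strong_induction_on with
  | _ n ih =>
    intro lo hi hn hlt hle
    rw [pvBest]
    by_cases hbase : hi ≤ lo + 1
    · have hhi : hi = lo + 1 := by omega
      have hlo : lo < cand.length := by omega
      have hdrop : cand.drop lo = cand[lo] :: cand.drop (lo + 1) :=
        List.drop_eq_getElem_cons hlo
      rw [if_pos hbase]
      have h1 : hi - lo = 1 := by omega
      rw [h1, hdrop]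
      simp only [List.take_succ_cons, List.take_zero, pvFold, List.foldl_nil]
      simp [List.getD_eq_getElem?_getD, List.getElem?_eq_getElem hlo]
    · simp only [hbase, if_false]
      have hmid1 : lo < (lo + hi) / 2 := by omega
      have hmid2 : (lo + hi) / 2 < hi := by omega
      rw [ih ((lo + hi) / 2 - lo) (by omega) lo ((lo + hi) / 2) rfl hmid1 (by omega),
          ih (hi - (lo + hi) / 2) (by omega) ((lo + hi) / 2) hi rfl hmid2 hle]
      have hsplit : (cand.drop lo).take (hi - lo) =
          (cand.drop lo).take ((lo + hi) / 2 - lo) ++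
          ((cand.drop ((lo + hi) / 2)).take (hi - (lo + hi) / 2)) := by
        rw [show hi - lo = ((lo + hi) / 2 - lo) + (hi - (lo + hi) / 2) by omega,
            List.take_add]
        congr 2
        rw [List.drop_drop]
        congr 1
        omega
      rw [hsplit, pvFold_append]
      · intro h
        have := congrArg List.length h
        simp at this
        omega
      · intro h
        have := congrArg List.length h
        simp at this
        omega

theorem sentinel_fold (d : List (List Int)) :
    ∀ (t : List Int) (m0 : Int), 0 ≤ m0 → (∀ i ∈ t, 0 ≤ i) →
      t.foldl (fun min i =>
          if min == -1 then i
          else if pvD0 d i < pvD0 d min then i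
          else min) m0
        = t.foldl (pvMatch d) m0 := by
  intro t
  induction t with
  | nil => intro m0 _ _; rfl
  | cons c t ih =>
    intro m0 hm hl
    have hc : (0 : Int) ≤ c := hl c (List.mem_cons_self ..)
    have hne : (m0 == -1) = false := by
      simp only [beq_eq_false_iff_ne]; omega
    simp only [List.foldl_cons, hne, Bool.false_eq_true, if_false]
    have hrest : ∀ i ∈ t, (0 : Int) ≤ i := fun i hi => hl i (List.mem_cons_of_mem _ hi)
    by_cases h : pvD0 d c < pvD0 d m0
    · rw [if_pos h, ih c hc hrest]
      unfold pvMatch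
      rw [if_pos h]
    · rw [if_neg h, ih m0 hm hrest]
      unfold pvMatch
      rw [if_neg h]

theorem mem_pyRange_nonneg {n i : Int} (h : i ∈ PySem.List.pyRange 0 n 1) : 0 ≤ i := by
  simp [PySem.List.pyRange] at h
  obtain ⟨k, _, rfl⟩ := h
  positivity

-- ===== VERDICT (by name: the statement is the Claim_ definition above) =====
theorem min_exclude_spec : Claim_equal_min_exclude := by
  intro distance marque _ _
  unfold Spec_min_exclude min_exclude min_exclude_alt
  rw [← List.foldl_filter]
  set cand := (PySem.List.pyRange 0 (distance.length : Int) 1).filter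
      (fun i => !(marque.contains i)) with hcand
  have hpos : ∀ i ∈ cand, (0 : Int) ≤ i := by
    intro i hi
    exact mem_pyRange_nonneg (List.mem_of_mem_filter hi)
  clear hcand
  revert hpos
  cases cand with
  | nil => intro _; simp
  | cons c t =>
    intro hpos
    have hc : (0 : Int) ≤ c := hpos c (List.mem_cons_self ..)
    simp only [List.foldl_cons, reduceCtorEq, if_false]
    have h1 : ((-1 : Int) == -1) = true := by decide
    rw [h1]
    simp only [if_true]
    rw [sentinel_fold distance t c hc (fun i hi => hpos i (List.mem_cons_of_mem _ hi))]
    rw [pvBest_eq_fold distance (c :: t) (c :: t).length 0 (c :: t).length rfl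
        (by simp) le_rfl]
    simp [pvFold]
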